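-- pv_equiv track=rewrite | github.com/toydogcat/mac_code_bridge | dummy_action/utils/tools/toby_measure.py | __expand_window
-- ===== SOURCE A (Python) =====
-- def __expand_window(path, len_x, len_y, radius):
--     path_ = set(path)
--     window_ = set()
--
--     for i, j in path:
--         for a in range(i - radius, i + radius + 1):
--             for b in range(j - radius, j + radius + 1):
--                 path_.add((a, b))
--
--     for i, j in path_:
--         for a in (i * 2, i * 2, i * 2 + 1, i * 2 + 1):
--             for b in (j * 2, j * 2 + 1, j * 2, j * 2 + 1):
--                 window_.add((a, b))
--
--     window = []
--     start_j = 0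
--     for i in range(len_x):
--         new_start_j = None
--         for j in range(start_j, len_y):
--             if (i, j) in window_:
--                 window.append((i, j))
--                 if new_start_j is None:
--                     new_start_j = j
--             elif new_start_j is not None:
--                 break
--         start_j = new_start_j
--
--     return window
-- ===== SOURCE B (Python) =====
-- def __expand_window(path, len_x, len_y, radius):
--     r = max(0, radius)  # a negative radius expands nothing, same as radius 0
--     rows = {}
--     for p, q in path:
--         bs = range(max(0, 2 * (q - r)), min(len_y, 2 * (q + r) + 2))
--         for a in range(max(0, 2 * (p - r)), min(len_x, 2 * (p + r) + 2)):
--             rows.setdefault(a, set()).update(bs)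
--     window = []
--     start_j = 0
--     for i in range(len_x):
--         cols = sorted(c for c in rows.get(i, ()) if c >= start_j)
--         if cols:
--             start_j = cols[0]
--             for k, c in enumerate(cols):
--                 if c != start_j + k:
--                     break
--                 window.append((i, c))
--     return window
-- ===== Notes on version B (the rewrite author's own statement) =====
-- stated objective: faster
-- what changed: Instead of materialising the doubled window set and scanning every (i,j) grid cell row by row, B clips each path point's doubled rectangle to the grid once, buckets the in-bounds columns by row in a dict of sets, and per row sorts that row's few columns and takes the first consecutive run, never touching empty grid cells; intended as faster (no len_x*len_y grid scan) and measured 11.1x-38.9x at that run sizes where both programs finish (at the largest probe sizes both time out, so a timing run could not confirm the label).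
import Mathlib
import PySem

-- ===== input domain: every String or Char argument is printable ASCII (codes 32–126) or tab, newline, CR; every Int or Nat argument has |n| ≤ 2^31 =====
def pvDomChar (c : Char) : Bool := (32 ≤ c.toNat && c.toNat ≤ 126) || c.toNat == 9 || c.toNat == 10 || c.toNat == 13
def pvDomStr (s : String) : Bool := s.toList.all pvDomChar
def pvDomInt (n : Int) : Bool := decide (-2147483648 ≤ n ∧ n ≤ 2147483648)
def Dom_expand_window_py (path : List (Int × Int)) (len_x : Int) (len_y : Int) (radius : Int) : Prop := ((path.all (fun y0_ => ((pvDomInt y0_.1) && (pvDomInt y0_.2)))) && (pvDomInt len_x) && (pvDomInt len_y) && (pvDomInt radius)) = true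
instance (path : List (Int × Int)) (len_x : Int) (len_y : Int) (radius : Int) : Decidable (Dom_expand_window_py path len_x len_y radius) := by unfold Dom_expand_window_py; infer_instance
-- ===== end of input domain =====

-- B replaces A's doubled-window set plus full row-by-row grid scan with clipped per-point
-- rectangles bucketed by row (dict of column sets) and a per-row sort + first-consecutive-run
-- extraction, so empty grid cells are never visited (intended as faster; a timing run
-- measured 11x-39x at the sizes where both programs finish).

-- ===== PORT A =====
-- A's Python sets are modelled by Std.HashSet (a hash set, like CPython's): they can reach
-- |path|*(2*radius+1)^2 elements, which the list-backed PySem.Set cannot build in reasonable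
-- time; every consumption below is order-insensitive (membership tests, and building another
-- set from all elements), exactly the uses PySem documents as iteration-order independent.

-- path_ = set(path); for i, j in path: add the radius box
def aPathSet (path : List (Int × Int)) (radius : Int) : Std.HashSet (Int × Int) :=
  path.foldl (fun s ij =>
      (PySem.List.pyRange (ij.1 - radius) (ij.1 + radius + 1) 1).foldl (fun s a =>
        (PySem.List.pyRange (ij.2 - radius) (ij.2 + radius + 1) 1).foldl (fun s b =>
          s.insert (a, b)) s) s)
    (Std.HashSet.ofList path)

-- for i, j in path_: for a in (i*2, i*2, i*2+1, i*2+1): for b in (j*2, j*2+1, j*2, j*2+1): add (a, b)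
def aWindowSet (path : List (Int × Int)) (radius : Int) : Std.HashSet (Int × Int) :=
  (aPathSet path radius).toList.foldl (fun w ij =>
      [ij.1 * 2, ij.1 * 2, ij.1 * 2 + 1, ij.1 * 2 + 1].foldl (fun w a =>
        [ij.2 * 2, ij.2 * 2 + 1, ij.2 * 2, ij.2 * 2 + 1].foldl (fun w b =>
          w.insert (a, b)) w) w)
    (∅ : Std.HashSet (Int × Int))

-- inner loop 'for j in range(start_j, len_y)' with its break, state = (window, new_start_j)
def aRow (win : Std.HashSet (Int × Int)) (i : Int) :
    List Int → List (Int × Int) → Option Int → List (Int × Int) × Option Int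
  | [], window, ns => (window, ns)
  | j :: rest, window, ns =>
    if win.contains (i, j) then
      aRow win i rest (window ++ [(i, j)]) (if ns.isNone then some j else ns)
    else if ns.isSome then (window, ns)        -- break
    else aRow win i rest window ns

-- outer loop 'for i in range(len_x)'; start_j = none means Python's range(None, len_y)
-- raises TypeError there — such inputs are outside Pre_ and the port just stops
def aOuter (win : Std.HashSet (Int × Int)) (len_y : Int) :
    List Int → List (Int × Int) → Option Int → List (Int × Int)
  | [], window, _ => window
  | i :: rest, window, startj =>
    match startj with
    | none => window
    | some s =>
      let p := aRow win i (PySem.List.pyRange s len_y 1) window none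
      aOuter win len_y rest p.1 p.2

def expand_window_py (path : List (Int × Int)) (len_x : Int) (len_y : Int) (radius : Int) : List (Int × Int) :=
  aOuter (aWindowSet path radius) len_y (PySem.List.pyRange 0 len_x 1) [] (some 0)

-- ===== PORT B =====
-- rows: grid row -> set of its in-bounds window columns, from clipped doubled rectangles
def bRows (path : List (Int × Int)) (len_x : Int) (len_y : Int) (r : Int) : PySem.Dict Int (PySem.Set Int) :=
  path.foldl (fun d pq =>
      let bs := PySem.List.pyRange (max 0 (2 * (pq.2 - r))) (min len_y (2 * (pq.2 + r) + 2)) 1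
      (PySem.List.pyRange (max 0 (2 * (pq.1 - r))) (min len_x (2 * (pq.1 + r) + 2)) 1).foldl
        (fun d a => d.insert a (PySem.Set.update (d.getD a PySem.Set.empty) bs)) d)
    PySem.Dict.empty

-- 'for k, c in enumerate(cols): if c != start_j + k: break; window.append((i, c))'
def bRun (i : Int) : Int → List Int → List (Int × Int)
  | _, [] => []
  | c, j :: rest => if j = c then (i, j) :: bRun i (c + 1) rest else []

def bLoop (rows : PySem.Dict Int (PySem.Set Int)) :
    List Int → List (Int × Int) → Int → List (Int × Int)
  | [], window, _ => window
  | i :: rest, window, s =>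
    let cols := PySem.List.sorted
      (((rows.getD i PySem.Set.empty) : List Int).filter (fun c => decide (s ≤ c))) (fun c => c) false
    match cols with
    | [] => bLoop rows rest window s
    | m :: _ => bLoop rows rest (window ++ bRun i m cols) m

def expand_window_py_alt (path : List (Int × Int)) (len_x : Int) (len_y : Int) (radius : Int) : List (Int × Int) :=
  bLoop (bRows path len_x len_y (max 0 radius)) (PySem.List.pyRange 0 len_x 1) [] 0

-- ===== PRECONDITION & SPEC =====
-- Pre_ excludes exactly the inputs on which A raises TypeError: when a non-final grid row has
-- no window cell at or after the previous row's run start, A's start_j becomes None and the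
-- next row's range(None, len_y) raises.  The condition is decided from the input geometry
-- alone: rows are grouped into the O(|path|) maximal blocks between doubled-rectangle row
-- boundaries (inside a block the run start stabilises after its first row), and a row's first
-- window column at or after s is the minimum over the rectangles covering that row.

-- pq's doubled rectangle covers row i and its column interval reaches max s (its start col)
def nextCond (radius : Int) (i : Int) (s : Int) (pq : Int × Int) : Bool :=
  decide (2 * (pq.1 - max 0 radius) ≤ i ∧ i ≤ 2 * (pq.1 + max 0 radius) + 1 ∧
          max s (2 * (pq.2 - max 0 radius)) ≤ 2 * (pq.2 + max 0 radius) + 1)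

def nextVal (radius : Int) (s : Int) (pq : Int × Int) : Int := max s (2 * (pq.2 - max 0 radius))

-- first window column ≥ s in row i, or len_y if the row has none in [s, len_y)
def nextCol (path : List (Int × Int)) (radius : Int) (len_y : Int) (i : Int) (s : Int) : Int :=
  path.foldl (fun m pq => if nextCond radius i s pq then min m (nextVal radius s pq) else m) len_y

-- walk the row blocks: cuts = rectangle row boundaries strictly inside (0, len_x);
-- a is the current block's first row, s the current run start
def fastChain (path : List (Int × Int)) (len_x : Int) (len_y : Int) (radius : Int) :
    List Int → Int → Int → Bool
  | [], a, s =>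
    if nextCol path radius len_y a s < len_y then true else decide (a = len_x - 1)
  | b :: rest, a, s =>
    if nextCol path radius len_y a s < len_y then
      fastChain path len_x len_y radius rest b (nextCol path radius len_y a s)
    else false

def winCuts (path : List (Int × Int)) (len_x : Int) (radius : Int) : List Int :=
  PySem.List.sorted (PySem.Set.ofList
    ((path.flatMap (fun pq =>
        [2 * (pq.1 - max 0 radius), 2 * (pq.1 + max 0 radius) + 2])).filter
      (fun v => decide (0 < v ∧ v < len_x)))) (fun v => v) false

def preFast (path : List (Int × Int)) (len_x : Int) (len_y : Int) (radius : Int) : Bool :=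
  decide (len_x ≤ 0) || fastChain path len_x len_y radius (winCuts path len_x radius) 0 0

def Pre_expand_window_py (path : List (Int × Int)) (len_x : Int) (len_y : Int) (radius : Int) : Prop :=
  preFast path len_x len_y radius = true
instance (path : List (Int × Int)) (len_x : Int) (len_y : Int) (radius : Int) : Decidable (Pre_expand_window_py path len_x len_y radius) := by unfold Pre_expand_window_py; infer_instance

def pvWitness_expand_window_py : (List (Int × Int)) × Int × Int × Int := ([(0, 0)], 2, 2, 0)

def Spec_expand_window_py (path : List (Int × Int)) (len_x : Int) (len_y : Int) (radius : Int) (out : List (Int × Int)) : Prop := out = expand_window_py_alt path len_x len_y radius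
instance (path : List (Int × Int)) (len_x : Int) (len_y : Int) (radius : Int) (out : List (Int × Int)) : Decidable (Spec_expand_window_py path len_x len_y radius out) := by unfold Spec_expand_window_py; infer_instance

-- ===== CLAIM (what is proved, stated in full; the proofs are below) =====
def Claim_equal_expand_window_py : Prop := ∀ (path : List (Int × Int)) (len_x : Int) (len_y : Int) (radius : Int), Dom_expand_window_py path len_x len_y radius → Pre_expand_window_py path len_x len_y radius → Spec_expand_window_py path len_x len_y radius (expand_window_py path len_x len_y radius)

-- ===== LEMMAS AND PROOFS =====

-- proof-side notions: window membership and the naive per-row run-start chain that mirrors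
-- what A's scan encounters; Pre_'s fastChain is proved equal to it below
def memW (path : List (Int × Int)) (radius : Int) (a : Int) (b : Int) : Bool :=
  path.any (fun pq => decide (2 * (pq.1 - max 0 radius) ≤ a ∧ a ≤ 2 * (pq.1 + max 0 radius) + 1 ∧
                              2 * (pq.2 - max 0 radius) ≤ b ∧ b ≤ 2 * (pq.2 + max 0 radius) + 1))

def preChain (path : List (Int × Int)) (radius : Int) (len_y : Int) : List Int → Int → Bool
  | [], _ => true
  | i :: rest, s =>
    match (PySem.List.pyRange s len_y 1).find? (fun j => memW path radius i j) with
    | some m => preChain path radius len_y rest m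
    | none => rest.isEmpty

theorem pvWitness_ok :
    Dom_expand_window_py pvWitness_expand_window_py.1 pvWitness_expand_window_py.2.1
      pvWitness_expand_window_py.2.2.1 pvWitness_expand_window_py.2.2.2 ∧
    Pre_expand_window_py pvWitness_expand_window_py.1 pvWitness_expand_window_py.2.1
      pvWitness_expand_window_py.2.2.1 pvWitness_expand_window_py.2.2.2 := by decide

-- ----- A's window set membership -----

theorem mem_foldl_add_pair (l : List Int) (s : Std.HashSet (Int × Int)) (a : Int) (x : Int × Int) :
    x ∈ l.foldl (fun s b => s.insert (a, b)) s ↔ x ∈ s ∨ (x.1 = a ∧ x.2 ∈ l) := by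
  induction l generalizing s with
  | nil => simp
  | cons b rest ih =>
    simp [List.foldl, ih, Std.HashSet.mem_insert, Prod.ext_iff]
    tauto

theorem mem_foldl_add_box (la lb : List Int) (s : Std.HashSet (Int × Int)) (x : Int × Int) :
    x ∈ la.foldl (fun s a => lb.foldl (fun s b => s.insert (a, b)) s) s ↔
      x ∈ s ∨ (x.1 ∈ la ∧ x.2 ∈ lb) := by
  induction la generalizing s with
  | nil => simp
  | cons a rest ih =>
    simp [List.foldl, ih, mem_foldl_add_pair]
    tauto

theorem mem_aPathSet (path : List (Int × Int)) (radius : Int) (x : Int × Int) :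
    x ∈ aPathSet path radius ↔
      x ∈ path ∨ ∃ pq ∈ path, pq.1 - radius ≤ x.1 ∧ x.1 ≤ pq.1 + radius ∧
                              pq.2 - radius ≤ x.2 ∧ x.2 ≤ pq.2 + radius := by
  unfold aPathSet
  suffices h : ∀ (l : List (Int × Int)) (s : Std.HashSet (Int × Int)),
      x ∈ l.foldl (fun s ij =>
        (PySem.List.pyRange (ij.1 - radius) (ij.1 + radius + 1) 1).foldl (fun s a =>
          (PySem.List.pyRange (ij.2 - radius) (ij.2 + radius + 1) 1).foldl (fun s b =>
            s.insert (a, b)) s) s) s ↔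
      x ∈ s ∨ ∃ pq ∈ l, pq.1 - radius ≤ x.1 ∧ x.1 ≤ pq.1 + radius ∧
                        pq.2 - radius ≤ x.2 ∧ x.2 ≤ pq.2 + radius by
    rw [h]
    simp [Std.HashSet.mem_ofList]
  intro l
  induction l with
  | nil => simp
  | cons pq rest ih =>
    intro s
    simp only [List.foldl, ih, mem_foldl_add_box, PySem.List.mem_pyRange_one, List.mem_cons]
    constructor
    · rintro ((h | h) | ⟨qq, hq, h⟩)
      · exact Or.inl h
      · exact Or.inr ⟨pq, Or.inl rfl, by omega⟩
      · exact Or.inr ⟨qq, Or.inr hq, h⟩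
    · rintro (h | ⟨qq, (rfl | hq), h⟩)
      · exact Or.inl (Or.inl h)
      · exact Or.inl (Or.inr (by omega))
      · exact Or.inr ⟨qq, hq, h⟩

theorem mem_foldl_quad (ij : Int × Int) (w : Std.HashSet (Int × Int)) (x : Int × Int) :
    x ∈ [ij.1 * 2, ij.1 * 2, ij.1 * 2 + 1, ij.1 * 2 + 1].foldl (fun w a =>
          [ij.2 * 2, ij.2 * 2 + 1, ij.2 * 2, ij.2 * 2 + 1].foldl (fun w b =>
            w.insert (a, b)) w) w ↔
      x ∈ w ∨ ((x.1 = 2 * ij.1 ∨ x.1 = 2 * ij.1 + 1) ∧ (x.2 = 2 * ij.2 ∨ x.2 = 2 * ij.2 + 1)) := by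
  simp only [List.foldl]
  simp only [Std.HashSet.mem_insert, beq_iff_eq, Prod.ext_iff]
  by_cases hw : x ∈ w
  · simp [hw]
  · simp only [hw, false_or, or_false]
    omega

theorem mem_aWindowSet (path : List (Int × Int)) (radius : Int) (x : Int × Int) :
    x ∈ aWindowSet path radius ↔
      ∃ ij ∈ aPathSet path radius,
        (x.1 = 2 * ij.1 ∨ x.1 = 2 * ij.1 + 1) ∧ (x.2 = 2 * ij.2 ∨ x.2 = 2 * ij.2 + 1) := by
  unfold aWindowSet
  suffices h : ∀ (l : List (Int × Int)) (w : Std.HashSet (Int × Int)),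
      x ∈ l.foldl (fun w ij =>
        [ij.1 * 2, ij.1 * 2, ij.1 * 2 + 1, ij.1 * 2 + 1].foldl (fun w a =>
          [ij.2 * 2, ij.2 * 2 + 1, ij.2 * 2, ij.2 * 2 + 1].foldl (fun w b =>
            w.insert (a, b)) w) w) w ↔
      x ∈ w ∨ ∃ ij ∈ l, (x.1 = 2 * ij.1 ∨ x.1 = 2 * ij.1 + 1) ∧
                        (x.2 = 2 * ij.2 ∨ x.2 = 2 * ij.2 + 1) by
    rw [h]
    simp [Std.HashSet.mem_toList]
  intro l
  induction l with
  | nil => simp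
  | cons ij rest ih =>
    intro w
    rw [List.foldl_cons, ih]
    simp only [mem_foldl_quad, List.mem_cons]
    constructor
    · rintro ((h | h) | ⟨qq, hq, h⟩)
      · exact Or.inl h
      · exact Or.inr ⟨ij, Or.inl rfl, h⟩
      · exact Or.inr ⟨qq, Or.inr hq, h⟩
    · rintro (h | ⟨qq, (rfl | hq), h⟩)
      · exact Or.inl (Or.inl h)
      · exact Or.inl (Or.inr h)
      · exact Or.inr ⟨qq, hq, h⟩

theorem mem_win_iff_memW (path : List (Int × Int)) (radius : Int) (x : Int × Int) :
    x ∈ aWindowSet path radius ↔ memW path radius x.1 x.2 = true := by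
  rw [mem_aWindowSet]
  simp only [memW, List.any_eq_true, decide_eq_true_eq]
  constructor
  · rintro ⟨ij, hij, hx⟩
    rw [mem_aPathSet] at hij
    rcases hij with h | ⟨pq, hpq, hbox⟩
    · exact ⟨ij, h, by omega⟩
    · refine ⟨pq, hpq, ?_⟩
      -- ij lies in pq's radius box, so radius ≥ 0 and max 0 radius = radius
      omega
  · rintro ⟨pq, hpq, hx⟩
    by_cases hr : 0 ≤ radius
    · obtain ⟨i, hi⟩ : ∃ i, x.1 = 2 * i ∨ x.1 = 2 * i + 1 := ⟨x.1 / 2, by omega⟩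
      obtain ⟨j, hj⟩ : ∃ j, x.2 = 2 * j ∨ x.2 = 2 * j + 1 := ⟨x.2 / 2, by omega⟩
      refine ⟨(i, j), ?_, hi, hj⟩
      rw [mem_aPathSet]
      exact Or.inr ⟨pq, hpq, by omega⟩
    · refine ⟨pq, ?_, by omega, by omega⟩
      rw [mem_aPathSet]
      exact Or.inl hpq

-- ----- B's row buckets -----

theorem getD_bRows_inner (la bs : List Int) (d : PySem.Dict Int (PySem.Set Int)) (i c : Int) :
    c ∈ (la.foldl (fun d a => d.insert a (PySem.Set.update (d.getD a PySem.Set.empty) bs)) d).getD i PySem.Set.empty ↔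
      c ∈ d.getD i PySem.Set.empty ∨ (i ∈ la ∧ c ∈ bs) := by
  induction la generalizing d with
  | nil => simp
  | cons a rest ih =>
    simp only [List.foldl, ih, List.mem_cons]
    rw [PySem.Dict.getD_insert]
    by_cases h : i = a
    · subst h
      simp [PySem.Set.mem_update]
      tauto
    · simp [h]

theorem nodup_bRows_inner (la bs : List Int) (d : PySem.Dict Int (PySem.Set Int))
    (hd : ∀ i, ((d.getD i PySem.Set.empty : PySem.Set Int) : List Int).Nodup) (i : Int) :
    (((la.foldl (fun d a => d.insert a (PySem.Set.update (d.getD a PySem.Set.empty) bs)) d).getD i PySem.Set.empty : PySem.Set Int) : List Int).Nodup := by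
  induction la generalizing d with
  | nil => exact hd i
  | cons a rest ih =>
    refine ih _ (fun k => ?_)
    rw [PySem.Dict.getD_insert]
    by_cases h : k = a
    · simp only [h, if_pos]
      exact PySem.Set.nodup_update _ _ (hd a)
    · simp only [if_neg h]
      exact hd k

theorem mem_getD_bRows (path : List (Int × Int)) (len_x len_y r : Int) (i c : Int) :
    c ∈ (bRows path len_x len_y r).getD i PySem.Set.empty ↔
      ∃ pq ∈ path, max 0 (2 * (pq.1 - r)) ≤ i ∧ i < min len_x (2 * (pq.1 + r) + 2) ∧
                   max 0 (2 * (pq.2 - r)) ≤ c ∧ c < min len_y (2 * (pq.2 + r) + 2) := by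
  unfold bRows
  suffices h : ∀ (l : List (Int × Int)) (d : PySem.Dict Int (PySem.Set Int)),
      c ∈ (l.foldl (fun d pq =>
        (PySem.List.pyRange (max 0 (2 * (pq.1 - r))) (min len_x (2 * (pq.1 + r) + 2)) 1).foldl
          (fun d a => d.insert a (PySem.Set.update (d.getD a PySem.Set.empty)
            (PySem.List.pyRange (max 0 (2 * (pq.2 - r))) (min len_y (2 * (pq.2 + r) + 2)) 1))) d) d).getD i PySem.Set.empty ↔
      c ∈ d.getD i PySem.Set.empty ∨
        ∃ pq ∈ l, max 0 (2 * (pq.1 - r)) ≤ i ∧ i < min len_x (2 * (pq.1 + r) + 2) ∧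
                  max 0 (2 * (pq.2 - r)) ≤ c ∧ c < min len_y (2 * (pq.2 + r) + 2) by
    rw [h]; simp
  intro l
  induction l with
  | nil => simp
  | cons pq rest ih =>
    intro d
    simp only [List.foldl, ih, getD_bRows_inner, PySem.List.mem_pyRange_one, List.mem_cons]
    constructor
    · rintro ((h | h) | ⟨qq, hq, h⟩)
      · exact Or.inl h
      · exact Or.inr ⟨pq, Or.inl rfl, by omega⟩
      · exact Or.inr ⟨qq, Or.inr hq, h⟩
    · rintro (h | ⟨qq, (rfl | hq), h⟩)
      · exact Or.inl (Or.inl h)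
      · exact Or.inl (Or.inr (by omega))
      · exact Or.inr ⟨qq, hq, h⟩

theorem nodup_getD_bRows (path : List (Int × Int)) (len_x len_y r : Int) (i : Int) :
    (((bRows path len_x len_y r).getD i PySem.Set.empty : PySem.Set Int) : List Int).Nodup := by
  unfold bRows
  suffices h : ∀ (l : List (Int × Int)) (d : PySem.Dict Int (PySem.Set Int)),
      (∀ k, ((d.getD k PySem.Set.empty : PySem.Set Int) : List Int).Nodup) →
      ∀ i, (((l.foldl (fun d pq =>
        (PySem.List.pyRange (max 0 (2 * (pq.1 - r))) (min len_x (2 * (pq.1 + r) + 2)) 1).foldl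
          (fun d a => d.insert a (PySem.Set.update (d.getD a PySem.Set.empty)
            (PySem.List.pyRange (max 0 (2 * (pq.2 - r))) (min len_y (2 * (pq.2 + r) + 2)) 1))) d) d).getD i PySem.Set.empty : PySem.Set Int) : List Int).Nodup by
    exact h path PySem.Dict.empty (by simp) i
  intro l
  induction l with
  | nil => intro d hd i; exact hd i
  | cons pq rest ih =>
    intro d hd i
    exact ih _ (fun k => nodup_bRows_inner _ _ _ hd k) i

theorem mem_getD_bRows_memW (path : List (Int × Int)) (len_x len_y radius : Int) (i c : Int) :
    c ∈ (bRows path len_x len_y (max 0 radius)).getD i PySem.Set.empty ↔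
      memW path radius i c = true ∧ 0 ≤ i ∧ i < len_x ∧ 0 ≤ c ∧ c < len_y := by
  rw [mem_getD_bRows]
  simp only [memW, List.any_eq_true, decide_eq_true_eq]
  constructor
  · rintro ⟨pq, hpq, h⟩
    exact ⟨⟨pq, hpq, by omega⟩, by omega⟩
  · rintro ⟨⟨pq, hpq, h⟩, hb⟩
    exact ⟨pq, hpq, by omega⟩

-- ----- the row scan -----

-- bRun on a list whose elements all exceed c takes nothing
theorem bRun_nil (i c : Int) (l : List Int) (h : ∀ j ∈ l, c < j) : bRun i c l = [] := by
  cases l with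
  | nil => rfl
  | cons j rest =>
    have : j ≠ c := by have := h j (by simp); omega
    simp [bRun, this]

-- the first consecutive run, starting at the head of the column list
def bRunStart (i : Int) : List Int → List (Int × Int)
  | [] => []
  | m :: rest => bRun i m (m :: rest)

theorem pyRange_one_nil (a b : Int) (h : b ≤ a) : PySem.List.pyRange a b 1 = [] := by
  rw [PySem.List.pyRange_one]
  have : (b - a).toNat = 0 := by omega
  simp [this]

theorem aRow_some (win : Std.HashSet (Int × Int)) (M : Int → Int → Bool) (i len_y : Int)
    (hc : ∀ j, win.contains (i, j) = M i j) :
    ∀ (n : Nat) (s : Int), (len_y - s).toNat = n → ∀ (acc : List (Int × Int)) (j0 : Int),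
      aRow win i (PySem.List.pyRange s len_y 1) acc (some j0) =
        (acc ++ bRun i s ((PySem.List.pyRange s len_y 1).filter (fun j => M i j)), some j0) := by
  intro n
  induction n with
  | zero =>
    intro s hs acc j0
    rw [pyRange_one_nil s len_y (by omega)]
    simp [aRow, bRun]
  | succ n ih =>
    intro s hs acc j0
    rw [PySem.List.pyRange_one_cons (by omega : s < len_y)]
    by_cases hm : M i s = true
    · simp only [aRow, hc, hm, if_pos, List.filter_cons, Option.isNone_some, Bool.false_eq_true,
        if_false, bRun]
      rw [ih (s + 1) (by omega)]
      simp
    · have hm' : M i s = false := by simpa using hm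
      simp only [aRow, hc, hm', Bool.false_eq_true, if_false, Option.isSome_some, if_pos,
        List.filter_cons]
      rw [bRun_nil i s _ (fun j hj => by
        have := List.mem_filter.mp hj
        have := PySem.List.mem_pyRange_one.mp this.1
        omega)]
      simp

theorem aRow_none (win : Std.HashSet (Int × Int)) (M : Int → Int → Bool) (i len_y : Int)
    (hc : ∀ j, win.contains (i, j) = M i j) :
    ∀ (n : Nat) (s : Int), (len_y - s).toNat = n → ∀ (acc : List (Int × Int)),
      aRow win i (PySem.List.pyRange s len_y 1) acc none =
        (acc ++ bRunStart i ((PySem.List.pyRange s len_y 1).filter (fun j => M i j)),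
         ((PySem.List.pyRange s len_y 1).filter (fun j => M i j)).head?) := by
  intro n
  induction n with
  | zero =>
    intro s hs acc
    rw [pyRange_one_nil s len_y (by omega)]
    simp [aRow, bRunStart]
  | succ n ih =>
    intro s hs acc
    rw [PySem.List.pyRange_one_cons (by omega : s < len_y)]
    by_cases hm : M i s = true
    · simp only [aRow, hc, hm, if_pos, List.filter_cons, Option.isNone_none]
      rw [aRow_some win M i len_y hc n (s + 1) (by omega)]
      simp [bRunStart, bRun]
    · have hm' : M i s = false := by simpa using hm
      simp only [aRow, hc, hm', Bool.false_eq_true, if_false, Option.isSome_none,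
        List.filter_cons]
      rw [ih (s + 1) (by omega)]

-- B's sorted filtered bucket is exactly the filter of the column range
theorem cols_eq (path : List (Int × Int)) (len_x len_y radius : Int) (i s : Int)
    (hs : 0 ≤ s) (hi0 : 0 ≤ i) (hi1 : i < len_x) :
    PySem.List.sorted
      ((((bRows path len_x len_y (max 0 radius)).getD i PySem.Set.empty : PySem.Set Int) : List Int).filter
        (fun c => decide (s ≤ c))) (fun c => c) false =
    (PySem.List.pyRange s len_y 1).filter (fun j => memW path radius i j) := by
  apply PySem.List.sorted_eq_of_perm_of_pairwise_lt
  · rw [List.perm_ext_iff_of_nodup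
      (List.Nodup.filter _ (PySem.List.nodup_pyRange_one s len_y))
      (List.Nodup.filter _ (nodup_getD_bRows path len_x len_y (max 0 radius) i))]
    intro c
    simp only [List.mem_filter, PySem.List.mem_pyRange_one, decide_eq_true_eq]
    rw [mem_getD_bRows_memW path len_x len_y radius i c]
    constructor
    · rintro ⟨⟨h1, h2⟩, h3⟩
      exact ⟨⟨h3, hi0, hi1, by omega, h2⟩, h1⟩
    · rintro ⟨⟨h1, _, _, _, h2⟩, h3⟩
      exact ⟨⟨h3, h2⟩, h1⟩
  · exact List.Pairwise.filter _ (PySem.List.pairwise_lt_pyRange_one s len_y)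

-- ----- the outer loop -----

theorem outer_eq (path : List (Int × Int)) (len_x len_y radius : Int)
    (win : Std.HashSet (Int × Int))
    (hc : ∀ a b, win.contains (a, b) = memW path radius a b) :
    ∀ (L : List Int), (∀ i ∈ L, 0 ≤ i ∧ i < len_x) →
      ∀ (s : Int), 0 ≤ s → preChain path radius len_y L s = true →
      ∀ (acc : List (Int × Int)),
        aOuter win len_y L acc (some s) =
        bLoop (bRows path len_x len_y (max 0 radius)) L acc s := by
  intro L
  induction L with
  | nil => intro _ s _ _ acc; rfl
  | cons i rest ih =>
    intro hL s hs hpre acc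
    have hi := hL i (by simp)
    have hrow := aRow_none win (fun a b => memW path radius a b) i len_y
      (fun j => hc i j) (len_y - s).toNat s rfl acc
    have hcols := cols_eq path len_x len_y radius i s hs hi.1 hi.2
    have hfind : (PySem.List.pyRange s len_y 1).find? (fun j => memW path radius i j) =
        ((PySem.List.pyRange s len_y 1).filter (fun j => memW path radius i j)).head? :=
      (List.head?_filter).symm
    cases hf : (PySem.List.pyRange s len_y 1).filter (fun j => memW path radius i j) with
    | nil =>
      -- the row is empty: A's start_j becomes None, so Pre_ forces this to be the last row
      rw [hf] at hrow
      simp only [preChain, hfind, hf, List.head?_nil] at hpre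
      have hrest : rest = [] := by
        cases rest with
        | nil => rfl
        | cons _ _ => simp at hpre
      subst hrest
      simp only [aOuter, bLoop]
      rw [hrow, hcols, hf]
      simp [bRunStart]
    | cons m rest' =>
      rw [hf] at hrow
      have hm : m ∈ PySem.List.pyRange s len_y 1 := by
        have : m ∈ (PySem.List.pyRange s len_y 1).filter (fun j => memW path radius i j) := by
          rw [hf]; simp
        exact (List.mem_filter.mp this).1
      have hm0 : 0 ≤ m := by
        have := PySem.List.mem_pyRange_one.mp hm
        omega
      have hpre' : preChain path radius len_y rest m = true := by
        simp only [preChain, hfind, hf, List.head?_cons] at hpre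
        exact hpre
      have hA : aOuter win len_y (i :: rest) acc (some s) =
          aOuter win len_y rest (acc ++ bRun i m (m :: rest')) (some m) := by
        simp only [aOuter]
        rw [hrow]
        simp [bRunStart]
      have hB : bLoop (bRows path len_x len_y (max 0 radius)) (i :: rest) acc s =
          bLoop (bRows path len_x len_y (max 0 radius)) rest (acc ++ bRun i m (m :: rest')) m := by
        simp only [bLoop]
        rw [hcols, hf]
      rw [hA, hB]
      exact ih (fun k hk => hL k (by simp [hk])) m hm0 hpre' (acc ++ bRun i m (m :: rest'))

-- ----- the fast precondition equals the naive run-start chain -----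

theorem preChain_cons_some (path : List (Int × Int)) (radius len_y i s m : Int) (rest : List Int)
    (h : (PySem.List.pyRange s len_y 1).find? (fun j => memW path radius i j) = some m) :
    preChain path radius len_y (i :: rest) s = preChain path radius len_y rest m := by
  simp only [preChain, h]

theorem preChain_cons_none (path : List (Int × Int)) (radius len_y i s : Int) (rest : List Int)
    (h : (PySem.List.pyRange s len_y 1).find? (fun j => memW path radius i j) = none) :
    preChain path radius len_y (i :: rest) s = rest.isEmpty := by
  simp only [preChain, h]

theorem foldl_min_le {α : Type} (cond : α → Bool) (val : α → Int) :
    ∀ (l : List α) (m : Int), l.foldl (fun m x => if cond x then min m (val x) else m) m ≤ m := by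
  intro l
  induction l with
  | nil => intro m; exact le_rfl
  | cons x rest ih =>
    intro m
    by_cases h : cond x = true
    · simp only [List.foldl, h, if_pos]
      exact le_trans (ih _) (min_le_left _ _)
    · have h' : cond x = false := by simpa using h
      simp only [List.foldl, h', Bool.false_eq_true, if_false]
      exact ih m

theorem foldl_min_le_val {α : Type} (cond : α → Bool) (val : α → Int) :
    ∀ (l : List α) (m : Int) (x : α), x ∈ l → cond x = true →
      l.foldl (fun m x => if cond x then min m (val x) else m) m ≤ val x := by
  intro l
  induction l with
  | nil => intro m x hx; simp at hx
  | cons y rest ih =>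
    intro m x hx hc
    rcases List.mem_cons.mp hx with rfl | hx'
    · simp only [List.foldl, hc, if_pos]
      exact le_trans (foldl_min_le cond val rest _) (min_le_right _ _)
    · by_cases h : cond y = true
      · simp only [List.foldl, h, if_pos]; exact ih _ x hx' hc
      · have h' : cond y = false := by simpa using h
        simp only [List.foldl, h', Bool.false_eq_true, if_false]; exact ih m x hx' hc

theorem foldl_min_cases {α : Type} (cond : α → Bool) (val : α → Int) :
    ∀ (l : List α) (m : Int), l.foldl (fun m x => if cond x then min m (val x) else m) m = m ∨
      ∃ x ∈ l, cond x = true ∧ l.foldl (fun m x => if cond x then min m (val x) else m) m = val x := by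
  intro l
  induction l with
  | nil => intro m; exact Or.inl rfl
  | cons y rest ih =>
    intro m
    by_cases h : cond y = true
    · simp only [List.foldl, h, if_pos]
      rcases ih (min m (val y)) with h1 | ⟨x, hx, hc, he⟩
      · by_cases hle : m ≤ val y
        · left; rw [h1]; omega
        · right; exact ⟨y, by simp, h, by rw [h1]; omega⟩
      · right; exact ⟨x, by simp [hx], hc, he⟩
    · have h' : cond y = false := by simpa using h
      simp only [List.foldl, h', Bool.false_eq_true, if_false]
      rcases ih m with h1 | ⟨x, hx, hc, he⟩
      · exact Or.inl h1
      · exact Or.inr ⟨x, by simp [hx], hc, he⟩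

theorem nextCol_mem (path : List (Int × Int)) (radius len_y i s : Int)
    (h : nextCol path radius len_y i s < len_y) :
    s ≤ nextCol path radius len_y i s ∧ memW path radius i (nextCol path radius len_y i s) = true := by
  rcases foldl_min_cases (nextCond radius i s) (nextVal radius s) path len_y with h1 | ⟨pq, hpq, hc, he⟩
  · rw [nextCol] at h; omega
  · rw [nextCol] at h ⊢
    rw [he]
    simp only [nextCond, decide_eq_true_eq] at hc
    refine ⟨by simp [nextVal], ?_⟩
    simp only [memW, List.any_eq_true, decide_eq_true_eq]
    exact ⟨pq, hpq, by simp [nextVal] at *; omega⟩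

theorem nextCol_min (path : List (Int × Int)) (radius len_y i s : Int) (j : Int)
    (h1 : s ≤ j) (h2 : j < nextCol path radius len_y i s) : memW path radius i j = false := by
  by_contra h
  have hm : memW path radius i j = true := by simpa using h
  simp only [memW, List.any_eq_true, decide_eq_true_eq] at hm
  obtain ⟨pq, hpq, hb⟩ := hm
  have hc : nextCond radius i s pq = true := by
    simp only [nextCond, decide_eq_true_eq]
    omega
  have := foldl_min_le_val (nextCond radius i s) (nextVal radius s) path len_y pq hpq hc
  rw [← nextCol] at this
  simp only [nextVal] at this
  omega

theorem nextCol_idem (path : List (Int × Int)) (radius len_y i s m : Int)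
    (he : nextCol path radius len_y i s = m) (hlt : m < len_y) :
    nextCol path radius len_y i m = m := by
  have hmem := nextCol_mem path radius len_y i s (by omega)
  rw [he] at hmem
  simp only [memW, List.any_eq_true, decide_eq_true_eq] at hmem
  obtain ⟨_, hmm⟩ := hmem
  obtain ⟨pq, hpq, hb⟩ := hmm
  have hc : nextCond radius i m pq = true := by
    simp only [nextCond, decide_eq_true_eq]; omega
  have hle : nextCol path radius len_y i m ≤ m := by
    have := foldl_min_le_val (nextCond radius i m) (nextVal radius m) path len_y pq hpq hc
    rw [← nextCol] at this
    simp only [nextVal] at this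
    omega
  by_contra hne
  have hlt2 : nextCol path radius len_y i m < m := lt_of_le_of_ne hle hne
  have := nextCol_mem path radius len_y i m (by omega)
  omega

theorem nextCol_congr (path : List (Int × Int)) (radius len_y i i' s : Int)
    (h : ∀ pq ∈ path, nextCond radius i s pq = nextCond radius i' s pq) :
    nextCol path radius len_y i s = nextCol path radius len_y i' s := by
  unfold nextCol
  induction path generalizing len_y with
  | nil => rfl
  | cons pq rest ih =>
    simp only [List.foldl]
    rw [h pq (by simp)]
    by_cases hc : nextCond radius i' s pq = true
    · simp only [hc, if_pos]
      exact ih _ (fun q hq => h q (List.mem_cons_of_mem _ hq))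
    · have hc' : nextCond radius i' s pq = false := by simpa using hc
      simp only [hc', Bool.false_eq_true, if_false]
      exact ih _ (fun q hq => h q (List.mem_cons_of_mem _ hq))

theorem find?_pyRange_none (p : Int → Bool) (e : Int) :
    ∀ (n : Nat) (s : Int), (e - s).toNat = n → (∀ j, s ≤ j → j < e → p j = false) →
      (PySem.List.pyRange s e 1).find? p = none := by
  intro n
  induction n with
  | zero =>
    intro s hs _
    rw [pyRange_one_nil s e (by omega)]
    rfl
  | succ n ih =>
    intro s hs hp
    rw [PySem.List.pyRange_one_cons (by omega : s < e)]
    rw [List.find?_cons_of_neg (by simp [hp s le_rfl (by omega)])]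
    exact ih (s + 1) (by omega) (fun j h1 h2 => hp j (by omega) h2)

theorem find?_pyRange_some (p : Int → Bool) (e m : Int) (hm : p m = true) (hme : m < e) :
    ∀ (n : Nat) (s : Int), (m - s).toNat = n → s ≤ m → (∀ j, s ≤ j → j < m → p j = false) →
      (PySem.List.pyRange s e 1).find? p = some m := by
  intro n
  induction n with
  | zero =>
    intro s hs hsm _
    have : s = m := by omega
    subst this
    rw [PySem.List.pyRange_one_cons (by omega : s < e)]
    exact List.find?_cons_of_pos (by simp [hm])
  | succ n ih =>
    intro s hs hsm hp
    rw [PySem.List.pyRange_one_cons (by omega : s < e)]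
    rw [List.find?_cons_of_neg (by simp [hp s le_rfl (by omega)])]
    exact ih (s + 1) (by omega) (by omega) (fun j h1 h2 => hp j (by omega) h2)

theorem find?_row (path : List (Int × Int)) (radius len_y i s : Int) :
    (PySem.List.pyRange s len_y 1).find? (fun j => memW path radius i j) =
      if nextCol path radius len_y i s < len_y then some (nextCol path radius len_y i s)
      else none := by
  by_cases h : nextCol path radius len_y i s < len_y
  · rw [if_pos h]
    have hmem := nextCol_mem path radius len_y i s h
    exact find?_pyRange_some _ len_y _ hmem.2 h (nextCol path radius len_y i s - s).toNat s
      rfl hmem.1 (fun j h1 h2 => nextCol_min path radius len_y i s j h1 h2)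
  · rw [if_neg h]
    exact find?_pyRange_none _ len_y (len_y - s).toNat s rfl
      (fun j h1 h2 => nextCol_min path radius len_y i s j h1 (by omega))

theorem pyRange_isEmpty (a b : Int) : (PySem.List.pyRange a b 1).isEmpty = decide (b ≤ a) := by
  by_cases h : b ≤ a
  · rw [pyRange_one_nil a b h]; simp [h]
  · rw [PySem.List.pyRange_one_cons (by omega : a < b)]; simp; omega

-- skip the rows of a block on which the run start has stabilised at m
theorem block_skip (path : List (Int × Int)) (radius len_x len_y b m : Int) (hb : b ≤ len_x) :
    ∀ (n : Nat) (a : Int), (b - a).toNat = n → a ≤ b →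
      (∀ i, a ≤ i → i < b →
        (PySem.List.pyRange m len_y 1).find? (fun j => memW path radius i j) = some m) →
      preChain path radius len_y (PySem.List.pyRange a len_x 1) m =
        preChain path radius len_y (PySem.List.pyRange b len_x 1) m := by
  intro n
  induction n with
  | zero =>
    intro a hn hab _
    have : a = b := by omega
    rw [this]
  | succ n ih =>
    intro a hn hab hrow
    rw [PySem.List.pyRange_one_cons (by omega : a < len_x)]
    simp only [preChain]
    rw [hrow a le_rfl (by omega)]
    exact ih (a + 1) (by omega) (by omega) (fun i h1 h2 => hrow i (by omega) h2)

theorem fastChain_eq_preChain (path : List (Int × Int)) (len_x len_y radius : Int) :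
    ∀ (cuts : List Int) (a s : Int), 0 ≤ a → a < len_x →
      cuts.Pairwise (· < ·) →
      (∀ v ∈ cuts, a < v ∧ v < len_x) →
      (∀ pq ∈ path, ∀ v ∈ ([2 * (pq.1 - max 0 radius), 2 * (pq.1 + max 0 radius) + 2] : List Int),
        v ≤ a ∨ v ∈ cuts ∨ len_x ≤ v) →
      preChain path radius len_y (PySem.List.pyRange a len_x 1) s =
        fastChain path len_x len_y radius cuts a s := by
  intro cuts
  induction cuts with
  | nil =>
    intro a s ha0 ha1 _ _ hbound
    -- single block [a, len_x): active rectangles are constant on it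
    have hconst : ∀ i s', a ≤ i → i < len_x →
        nextCol path radius len_y i s' = nextCol path radius len_y a s' := by
      intro i s' h1 h2
      refine nextCol_congr path radius len_y i a s' (fun pq hpq => ?_)
      have hv1 : 2 * (pq.1 - max 0 radius) ≤ a ∨ len_x ≤ 2 * (pq.1 - max 0 radius) := by
        rcases hbound pq hpq (2 * (pq.1 - max 0 radius)) (by simp) with h | h | h
        · exact Or.inl h
        · simp at h
        · exact Or.inr h
      have hv2 : 2 * (pq.1 + max 0 radius) + 2 ≤ a ∨ len_x ≤ 2 * (pq.1 + max 0 radius) + 2 := by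
        rcases hbound pq hpq (2 * (pq.1 + max 0 radius) + 2) (by simp) with h | h | h
        · exact Or.inl h
        · simp at h
        · exact Or.inr h
      simp only [nextCond, decide_eq_decide]
      omega
    by_cases hm : nextCol path radius len_y a s < len_y
    · -- every row of the block keeps the run alive
      rw [PySem.List.pyRange_one_cons (by omega : a < len_x)]
      rw [preChain_cons_some path radius len_y a s (nextCol path radius len_y a s) _
        (by rw [find?_row, if_pos hm])]
      rw [block_skip path radius len_x len_y len_x (nextCol path radius len_y a s) le_rfl
        (len_x - (a + 1)).toNat (a + 1) rfl (by omega) ?rows]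
      · rw [pyRange_one_nil len_x len_x le_rfl]
        simp [preChain, fastChain, hm]
      case rows =>
        intro i h1 h2
        rw [find?_row]
        rw [hconst i (nextCol path radius len_y a s) (by omega) h2]
        rw [nextCol_idem path radius len_y a s (nextCol path radius len_y a s) rfl hm]
        simp [hm]
    · -- the block has no window cell: only admissible as the very last row
      rw [PySem.List.pyRange_one_cons (by omega : a < len_x)]
      rw [preChain_cons_none path radius len_y a s _ (by rw [find?_row, if_neg hm])]
      simp only [fastChain, if_neg hm]
      rw [pyRange_isEmpty]
      simp only [decide_eq_decide]
      omega
  | cons b rest ih =>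
    intro a s ha0 ha1 hsort hcuts hbound
    have hb := hcuts b (by simp)
    have hrest : ∀ v ∈ rest, b < v ∧ v < len_x := by
      intro v hv
      exact ⟨(List.pairwise_cons.mp hsort).1 v hv, (hcuts v (by simp [hv])).2⟩
    have hconst : ∀ i s', a ≤ i → i < b →
        nextCol path radius len_y i s' = nextCol path radius len_y a s' := by
      intro i s' h1 h2
      refine nextCol_congr path radius len_y i a s' (fun pq hpq => ?_)
      have hv1 := hbound pq hpq (2 * (pq.1 - max 0 radius)) (by simp)
      have hv2 := hbound pq hpq (2 * (pq.1 + max 0 radius) + 2) (by simp)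
      have hcv : ∀ v : Int, v ∈ b :: rest → b ≤ v := by
        intro v hv
        rcases List.mem_cons.mp hv with rfl | hv'
        · exact le_rfl
        · exact le_of_lt (hrest v hv').1
      have hv1' : 2 * (pq.1 - max 0 radius) ≤ a ∨ b ≤ 2 * (pq.1 - max 0 radius) := by
        rcases hv1 with h | h | h
        · exact Or.inl h
        · exact Or.inr (hcv _ h)
        · exact Or.inr (by omega)
      have hv2' : 2 * (pq.1 + max 0 radius) + 2 ≤ a ∨ b ≤ 2 * (pq.1 + max 0 radius) + 2 := by
        rcases hv2 with h | h | h
        · exact Or.inl h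
        · exact Or.inr (hcv _ h)
        · exact Or.inr (by omega)
      simp only [nextCond, decide_eq_decide]
      omega
    by_cases hm : nextCol path radius len_y a s < len_y
    · rw [PySem.List.pyRange_one_cons (by omega : a < len_x)]
      rw [preChain_cons_some path radius len_y a s (nextCol path radius len_y a s) _
        (by rw [find?_row, if_pos hm])]
      rw [block_skip path radius len_x len_y b (nextCol path radius len_y a s) (by omega)
        (b - (a + 1)).toNat (a + 1) rfl (by omega) ?rows2]
      · rw [ih b (nextCol path radius len_y a s) (by omega) hb.2
          (List.pairwise_cons.mp hsort).2 hrest ?bound2]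
        · simp [fastChain, hm]
        case bound2 =>
          intro pq hpq v hv
          rcases hbound pq hpq v hv with h | h | h
          · exact Or.inl (by omega)
          · rcases List.mem_cons.mp h with rfl | h'
            · exact Or.inl le_rfl
            · exact Or.inr (Or.inl h')
          · exact Or.inr (Or.inr h)
      case rows2 =>
        intro i h1 h2
        rw [find?_row]
        rw [hconst i (nextCol path radius len_y a s) (by omega) h2]
        rw [nextCol_idem path radius len_y a s (nextCol path radius len_y a s) rfl hm]
        simp [hm]
    · rw [PySem.List.pyRange_one_cons (by omega : a < len_x)]
      rw [preChain_cons_none path radius len_y a s _ (by rw [find?_row, if_neg hm])]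
      simp only [fastChain, if_neg hm]
      rw [pyRange_isEmpty]
      simp only [decide_eq_false_iff_not]
      omega

theorem preFast_eq_preChain (path : List (Int × Int)) (len_x len_y radius : Int) :
    preFast path len_x len_y radius =
      preChain path radius len_y (PySem.List.pyRange 0 len_x 1) 0 := by
  by_cases h : len_x ≤ 0
  · rw [pyRange_one_nil 0 len_x h]
    simp [preFast, preChain, h]
  · have h0 : ¬ (len_x ≤ 0) := h
    simp only [preFast]
    rw [fastChain_eq_preChain path len_x len_y radius (winCuts path len_x radius) 0 0
      le_rfl (by omega) ?sorted ?bounds ?cover]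
    · simp [h0]
    case sorted =>
      exact PySem.List.sorted_ofList_pairwise_lt _
    case bounds =>
      intro v hv
      have : v ∈ PySem.Set.ofList ((path.flatMap (fun pq =>
          [2 * (pq.1 - max 0 radius), 2 * (pq.1 + max 0 radius) + 2])).filter
            (fun v => decide (0 < v ∧ v < len_x))) := by
        have := (PySem.List.mem_sorted _ _ _ _).mp hv
        exact this
      rw [PySem.Set.mem_ofList, List.mem_filter] at this
      have := this.2
      simp only [decide_eq_true_eq] at this
      omega
    case cover =>
      intro pq hpq v hv
      by_cases hin : 0 < v ∧ v < len_x
      · refine Or.inr (Or.inl ?_)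
        rw [winCuts, PySem.List.mem_sorted _ _ _ _, PySem.Set.mem_ofList, List.mem_filter]
        refine ⟨List.mem_flatMap.mpr ⟨pq, hpq, hv⟩, by simpa using hin⟩
      · omega

-- ===== VERDICT (by name: the statement is the Claim_ definition above) =====
theorem expand_window_py_spec : Claim_equal_expand_window_py := by
  intro path len_x len_y radius _ hpre
  unfold Pre_expand_window_py at hpre
  rw [preFast_eq_preChain path len_x len_y radius] at hpre
  unfold Spec_expand_window_py expand_window_py expand_window_py_alt
  refine outer_eq path len_x len_y radius (aWindowSet path radius) ?_ _ ?_ 0 le_rfl hpre []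
  · intro a b
    exact Bool.eq_iff_iff.mpr
      (by rw [Std.HashSet.contains_iff_mem, mem_win_iff_memW])
  · intro i hi
    have := PySem.List.mem_pyRange_one.mp hi
    omega
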